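-- pv_equiv track=rewrite | github.com/Kidus-M/A2SV_leetcode- | Codeforces - Codeforces Beta Round 26 Codeforces format/A. Almost Prime.py | count_almost_prime
-- ===== SOURCE A (Python) =====
-- def is_prime(n):
--     if n < 2:
--         return False
--     for i in range(2, int(n ** 0.5) + 1):
--         if n % i == 0:
--             return False
--     return True
--
-- def count_almost_prime(n):
--     count = 0
--     for num in range(1, n + 1):
--         divisors = set()
--         temp = num
--         i = 2
--         while i * i <= temp:
--             while temp % i == 0:
--                 divisors.add(i)
--                 temp //= i
--             i += 1
--         if temp > 1:
--             divisors.add(temp)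
--         if len(divisors) == 2 and all(is_prime(p) for p in divisors):
--             count += 1
--     return count
-- ===== SOURCE B (Python) =====
-- def count_almost_prime(n):
--     # Sieve: omega[m] = number of distinct prime factors of m; count m with omega[m] == 2.
--     omega = [0] * (n + 1)
--     for p in range(2, n + 1):
--         if omega[p] == 0:  # no smaller prime divides p, so p is prime
--             for m in range(p, n + 1, p):
--                 omega[m] += 1
--     return sum(1 for v in omega if v == 2)
-- ===== Notes on version B (the rewrite author's own statement) =====
-- stated objective: faster
-- what changed: Replaces per-number trial-division factorization (plus a redundant primality re-check of each factor) with a single sieve that increments a distinct-prime-factor counter over the multiples of each prime, then counts entries equal to 2.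
import Mathlib
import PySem

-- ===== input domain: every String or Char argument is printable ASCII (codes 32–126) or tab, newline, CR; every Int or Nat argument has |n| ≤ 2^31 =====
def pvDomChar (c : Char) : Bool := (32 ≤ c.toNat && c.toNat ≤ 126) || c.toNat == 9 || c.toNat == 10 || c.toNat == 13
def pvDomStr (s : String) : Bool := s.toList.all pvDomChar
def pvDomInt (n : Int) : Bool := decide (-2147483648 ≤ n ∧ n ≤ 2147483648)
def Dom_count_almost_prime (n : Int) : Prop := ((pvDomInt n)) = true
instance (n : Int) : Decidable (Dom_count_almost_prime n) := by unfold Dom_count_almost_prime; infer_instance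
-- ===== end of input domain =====

-- B replaces A's per-number trial-division factorization by a sieve that counts
-- distinct prime factors of every m ≤ n at once (objective: faster).

-- ===== PORT A =====
-- A's loop variables (num, temp, i) are always nonnegative Python ints, so the
-- factorization loops are ported over Nat ('%' / '//' on nonnegative ints agree
-- with Nat.mod / Nat.div).  The '2 ≤ i ∧ 0 < temp' part of the guard is a totality
-- guard only (Python's inner 'while' condition is 'temp % i == 0'; on the values
-- the loop is actually entered with, i ≥ 2 and temp ≥ 1 always hold).
def divAllA (i : Nat) : Nat → PySem.Set Int → Nat × PySem.Set Int
  | temp, s =>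
    if h : 2 ≤ i ∧ 0 < temp ∧ temp % i = 0 then
      divAllA i (temp / i) (PySem.Set.add s (i : Int))
    else (temp, s)
  termination_by temp => temp
  decreasing_by exact Nat.div_lt_self h.2.1 (by omega)

theorem divAllA_fst_le (i temp : Nat) (s : PySem.Set Int) :
    (divAllA i temp s).1 ≤ temp := by
  fun_induction divAllA with
  | case1 temp s h ih => exact le_trans ih (Nat.le_of_lt (Nat.div_lt_self h.2.1 (by omega)))
  | case2 temp s h => exact le_refl _

-- outer 'while i * i <= temp' loop of A
def outerA (temp i : Nat) (s : PySem.Set Int) : PySem.Set Int :=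
  if h : i * i ≤ temp then
    outerA (divAllA i temp s).1 (i + 1) (divAllA i temp s).2
  else if 1 < temp then PySem.Set.add s (temp : Int) else s
  termination_by (temp, temp + 2 - i)
  decreasing_by
    have hle := divAllA_fst_le i temp s
    have hii : i ≤ i * i := by nlinarith
    rcases lt_or_eq_of_le hle with hlt | heq
    · exact Prod.Lex.left _ _ hlt
    · rw [heq]; exact Prod.Lex.right _ (by omega)

-- is_prime of A; 'int(n ** 0.5)' equals Nat.sqrt on the whole domain |n| ≤ 2^31
-- (the float sqrt of such ints truncates to the integer square root).
def isPrimeA (x : Int) : Bool :=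
  if x < 2 then false
  else !((PySem.List.pyRange 2 ((x.toNat.sqrt : Int) + 1) 1).any
          (fun i => PySem.Int.mod x i == 0))

def count_almost_prime (n : Int) : Int :=
  (PySem.List.pyRange 1 (n + 1) 1).foldl
    (fun count num =>
      if (outerA num.toNat 2 PySem.Set.empty).length == 2
          && (outerA num.toNat 2 PySem.Set.empty).all isPrimeA
      then count + 1 else count)
    0

-- ===== PORT B =====
-- omega[m] += 1 of Source B; the index is always in range when it is executed
def bumpB (ω : List Int) (m : Int) : List Int :=
  match PySem.List.pyGet? ω m with
  | some v => ω.set m.toNat (v + 1)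
  | none => ω

-- the sieve loop of Source B building the list omega
def sieveB (n : Int) : List Int :=
  (PySem.List.pyRange 2 (n + 1) 1).foldl
    (fun ω p =>
      if PySem.List.pyGet? ω p == some 0 then
        (PySem.List.pyRange p (n + 1) p).foldl bumpB ω
      else ω)
    (List.replicate (n + 1).toNat 0)

def count_almost_prime_alt (n : Int) : Int :=
  (sieveB n).foldl (fun acc v => if v == 2 then acc + 1 else acc) 0

-- ===== PRECONDITION & SPEC =====
def Spec_count_almost_prime (n : Int) (out : Int) : Prop := out = count_almost_prime_alt n
instance (n : Int) (out : Int) : Decidable (Spec_count_almost_prime n out) := by unfold Spec_count_almost_prime; infer_instance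

-- ===== CLAIM (what is proved, stated in full; the proofs are below) =====
def Claim_equal_count_almost_prime : Prop := ∀ (n : Int), Dom_count_almost_prime n → Spec_count_almost_prime n (count_almost_prime n)

-- ===== LEMMAS AND PROOFS =====

theorem divAllA_spec (i temp : Nat) (s : PySem.Set Int) (hi : 2 ≤ i) (ht : 0 < temp) :
    ∃ k : Nat, temp = i ^ k * (divAllA i temp s).1 ∧ ¬ i ∣ (divAllA i temp s).1 ∧
      (divAllA i temp s).2 = (if i ∣ temp then PySem.Set.add s (i : Int) else s) := by
  fun_induction divAllA with
  | case1 temp s h ih =>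
    have hdvd : i ∣ temp := Nat.dvd_iff_mod_eq_zero.mpr h.2.2
    have hile : i ≤ temp := Nat.le_of_dvd h.2.1 hdvd
    have hpos : 0 < temp / i := Nat.div_pos hile (by omega)
    obtain ⟨k, hk, hnd, hs⟩ := ih hpos
    refine ⟨k + 1, ?_, hnd, ?_⟩
    · have : i * (temp / i) = temp := Nat.mul_div_cancel' hdvd
      rw [pow_succ]
      calc temp = i * (temp / i) := this.symm
        _ = i * (i ^ k * (divAllA i (temp / i) (PySem.Set.add s i)).1) := by rw [← hk]
        _ = i ^ k * i * (divAllA i (temp / i) (PySem.Set.add s i)).1 := by ring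
    · rw [hs, if_pos hdvd]
      split_ifs with h2
      · rw [PySem.Set.add_of_mem]
        exact (PySem.Set.mem_add _ _ _).mpr (Or.inr rfl)
      · rfl
  | case2 temp s h =>
    refine ⟨0, by simp, ?_, ?_⟩
    · intro hdvd
      exact h ⟨hi, ht, Nat.dvd_iff_mod_eq_zero.mp hdvd⟩
    · rw [if_neg]
      intro hdvd
      exact h ⟨hi, ht, Nat.dvd_iff_mod_eq_zero.mp hdvd⟩

theorem outerA_spec (temp i : Nat) (s : PySem.Set Int) :
    0 < temp → 2 ≤ i → (∀ p : Nat, p.Prime → p ∣ temp → i ≤ p) →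
    s.Nodup → (∀ p : Nat, p.Prime → p ∣ temp → (p : Int) ∉ s) →
    (outerA temp i s).Nodup ∧
      (∀ x : Int, x ∈ outerA temp i s ↔ x ∈ s ∨ ∃ p : Nat, p.Prime ∧ p ∣ temp ∧ x = (p : Int)) := by
  fun_induction outerA with
  | case1 temp i s h ih =>
    intro ht hi hmin hnd hdisj
    obtain ⟨k, hk, hndvd, hs⟩ := divAllA_spec i temp s hi ht
    set r := (divAllA i temp s).1 with hr
    have hrpos : 0 < r := by
      rcases Nat.eq_zero_or_pos r with h0 | h0
      · rw [h0, mul_zero] at hk; omega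
      · exact h0
    have hrdvd : r ∣ temp := ⟨i ^ k, by rw [hk]; ring⟩
    by_cases hdv : i ∣ temp
    · -- i divides temp: i is prime, divAllA added it
      have hkpos : 0 < k := by
        rcases Nat.eq_zero_or_pos k with h0 | h0
        · exfalso; rw [h0, pow_zero, one_mul] at hk; rw [← hk] at hndvd; exact hndvd hdv
        · exact h0
      have hiprime : i.Prime := by
        rw [Nat.prime_def_minFac]
        refine ⟨hi, ?_⟩
        have hq : i.minFac.Prime := Nat.minFac_prime (by omega)
        have h1 : i.minFac ∣ temp := dvd_trans (Nat.minFac_dvd i) hdv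
        have h2 := hmin i.minFac hq h1
        have h3 := Nat.minFac_le (by omega : 0 < i)
        omega
      -- prime factors of temp = {i} ∪ prime factors of r
      have hfact : ∀ p : Nat, p.Prime → (p ∣ temp ↔ p = i ∨ p ∣ r) := by
        intro p hp
        constructor
        · intro hpt
          rw [hk] at hpt
          rcases hp.dvd_mul.mp hpt with h1 | h1
          · exact Or.inl ((Nat.prime_dvd_prime_iff_eq hp hiprime).mp (hp.dvd_of_dvd_pow h1))
          · exact Or.inr h1
        · rintro (rfl | h1)
          · exact hdv
          · exact dvd_trans h1 hrdvd
      rw [hs, if_pos hdv] at *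
      have hmin' : ∀ p : Nat, p.Prime → p ∣ r → i + 1 ≤ p := by
        intro p hp hpr
        have h1 := hmin p hp (dvd_trans hpr hrdvd)
        rcases Nat.eq_or_lt_of_le h1 with h2 | h2
        · exact absurd (show i ∣ r by rw [h2]; exact hpr) hndvd
        · omega
      have hnd' : (PySem.Set.add s (i : Int)).Nodup := PySem.Set.nodup_add s _ hnd
      have hdisj' : ∀ p : Nat, p.Prime → p ∣ r → (p : Int) ∉ PySem.Set.add s (i : Int) := by
        intro p hp hpr hmem
        rcases (PySem.Set.mem_add _ _ _).mp hmem with h1 | h1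
        · exact hdisj p hp (dvd_trans hpr hrdvd) h1
        · have : p = i := Nat.cast_injective h1
          rw [this] at hpr; exact hndvd hpr
      obtain ⟨ndA, memA⟩ := ih hrpos (by omega) hmin' hnd' hdisj'
      refine ⟨ndA, fun x => ?_⟩
      rw [memA x, PySem.Set.mem_add]
      constructor
      · rintro ((h1 | h1) | ⟨p, hp, hpr, rfl⟩)
        · exact Or.inl h1
        · exact Or.inr ⟨i, hiprime, hdv, h1⟩
        · exact Or.inr ⟨p, hp, (hfact p hp).mpr (Or.inr hpr), rfl⟩
      · rintro (h1 | ⟨p, hp, hpt, rfl⟩)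
        · exact Or.inl (Or.inl h1)
        · rcases (hfact p hp).mp hpt with rfl | h2
          · exact Or.inl (Or.inr rfl)
          · exact Or.inr ⟨p, hp, h2, rfl⟩
    · -- i does not divide temp: nothing changed, move to i+1
      have hk0 : k = 0 := by
        rcases Nat.eq_zero_or_pos k with h0 | h0
        · exact h0
        · exfalso; exact hdv ⟨i ^ (k - 1) * r, by rw [hk]; cases k with
            | zero => omega
            | succ k' => simp [pow_succ]; ring⟩
      have hrtemp : r = temp := by rw [hk, hk0, pow_zero, one_mul]
      rw [hs, if_neg hdv] at ih ⊢
      have hmin' : ∀ p : Nat, p.Prime → p ∣ r → i + 1 ≤ p := by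
        intro p hp hpr
        have h1 := hmin p hp (hrtemp ▸ hpr)
        rcases Nat.eq_or_lt_of_le h1 with h2 | h2
        · exact absurd (show i ∣ temp by rw [h2, ← hrtemp]; exact hpr) hdv
        · omega
      obtain ⟨ndA, memA⟩ := ih hrpos (by omega) hmin' hnd (by rw [hrtemp]; exact hdisj)
      exact ⟨ndA, fun x => by rw [memA x, hrtemp]⟩
  | case2 temp i s h htemp =>
    intro ht hi hmin hnd hdisj
    have hprime : temp.Prime := by
      by_contra hnp
      have h1 := Nat.minFac_sq_le_self ht hnp
      have h2 := hmin temp.minFac (Nat.minFac_prime (by omega)) (Nat.minFac_dvd temp)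
      have : i * i ≤ temp.minFac * temp.minFac := Nat.mul_le_mul h2 h2
      have : temp.minFac * temp.minFac ≤ temp := by nlinarith [h1]
      omega
    refine ⟨PySem.Set.nodup_add s _ hnd, fun x => ?_⟩
    rw [PySem.Set.mem_add]
    constructor
    · rintro (h1 | h1)
      · exact Or.inl h1
      · exact Or.inr ⟨temp, hprime, dvd_refl temp, h1⟩
    · rintro (h1 | ⟨p, hp, hpt, rfl⟩)
      · exact Or.inl h1
      · rcases (Nat.Prime.eq_one_or_self_of_dvd hprime p hpt) with h2 | h2
        · exact absurd h2 hp.ne_one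
        · exact Or.inr (by rw [h2])
  | case3 temp i s h htemp =>
    intro ht hi hmin hnd hdisj
    have h1 : temp = 1 := by omega
    refine ⟨hnd, fun x => ?_⟩
    constructor
    · exact Or.inl
    · rintro (h2 | ⟨p, hp, hpt, rfl⟩)
      · exact h2
      · rw [h1] at hpt
        exact absurd (Nat.eq_one_of_dvd_one hpt) hp.ne_one

theorem isPrimeA_of_prime (p : Nat) (hp : p.Prime) : isPrimeA (p : Int) = true := by
  unfold isPrimeA
  rw [if_neg (by exact_mod_cast not_lt.mpr hp.two_le)]
  simp only [Bool.not_eq_true', List.any_eq_false]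
  intro i hi
  rw [PySem.List.mem_pyRange_one] at hi
  intro hmod
  rw [beq_iff_eq] at hmod
  have hdvd : i ∣ (p : Int) := (PySem.Int.mod_eq_zero_iff_dvd _ _).mp hmod
  have hi0 : 0 ≤ i := by omega
  have : (i.toNat : Int) = i := Int.toNat_of_nonneg hi0
  rw [← this] at hdvd
  have hdvdN : i.toNat ∣ p := Int.natCast_dvd_natCast.mp hdvd
  have hle : i.toNat ≤ (p : Int).toNat.sqrt := by omega
  have hsq : (p : Int).toNat.sqrt < p := by
    have : (p : Int).toNat = p := Int.toNat_natCast p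
    rw [this]
    exact Nat.sqrt_lt_self hp.one_lt
  rcases hp.eq_one_or_self_of_dvd i.toNat hdvdN with h1 | h1 <;> omega

theorem outerA_card (num : Nat) (h : 0 < num) :
    (outerA num 2 PySem.Set.empty).length = num.primeFactors.card ∧
      ∀ x ∈ outerA num 2 PySem.Set.empty, ∃ p : Nat, p.Prime ∧ x = (p : Int) := by
  obtain ⟨hnd, hmem⟩ := outerA_spec num 2 PySem.Set.empty h (le_refl 2)
    (fun p hp _ => hp.two_le) List.nodup_nil (fun _ _ _ hx => absurd hx (List.not_mem_nil))
  have hmem' : ∀ x : Int, x ∈ outerA num 2 PySem.Set.empty ↔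
      ∃ p : Nat, p ∈ num.primeFactors ∧ x = (p : Int) := by
    intro x
    rw [hmem x]
    constructor
    · rintro (hx | ⟨p, hp, hpd, rfl⟩)
      · exact absurd hx (List.not_mem_nil)
      · exact ⟨p, Nat.mem_primeFactors.mpr ⟨hp, hpd, by omega⟩, rfl⟩
    · rintro ⟨p, hp, rfl⟩
      obtain ⟨h1, h2, _⟩ := Nat.mem_primeFactors.mp hp
      exact Or.inr ⟨p, h1, h2, rfl⟩
  constructor
  · have : (outerA num 2 PySem.Set.empty).toFinset
        = num.primeFactors.image (fun p : Nat => (p : Int)) := by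
      ext x
      simp only [List.mem_toFinset, Finset.mem_image, hmem' x]
      constructor
      · rintro ⟨p, h1, rfl⟩; exact ⟨p, h1, rfl⟩
      · rintro ⟨p, h1, rfl⟩; exact ⟨p, h1, rfl⟩
    have hcard := congrArg Finset.card this
    rw [List.toFinset_card_of_nodup hnd,
      Finset.card_image_of_injective _ Nat.cast_injective] at hcard
    exact hcard
  · intro x hx
    obtain ⟨p, h1, rfl⟩ := (hmem' x).mp hx
    exact ⟨p, (Nat.mem_primeFactors.mp h1).1, rfl⟩

theorem indicatorA (num : Nat) (h : 0 < num) :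
    ((outerA num 2 PySem.Set.empty).length == 2
        && (outerA num 2 PySem.Set.empty).all isPrimeA)
      = (num.primeFactors.card == 2) := by
  obtain ⟨hlen, hpr⟩ := outerA_card num h
  by_cases hc : num.primeFactors.card = 2
  · rw [hlen]
    simp only [hc, beq_self_eq_true, Bool.true_and]
    rw [List.all_eq_true]
    intro x hx
    obtain ⟨p, hp, rfl⟩ := hpr x hx
    exact isPrimeA_of_prime p hp
  · rw [hlen]
    simp [hc]

theorem countA (n : Int) :
    count_almost_prime n
      = ((PySem.List.pyRange 1 (n + 1) 1).countP
          (fun num => num.toNat.primeFactors.card == 2) : Nat) := by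
  unfold count_almost_prime
  rw [PySem.List.foldl_if_add_one
    (fun num : Int => (outerA num.toNat 2 PySem.Set.empty).length == 2
        && (outerA num.toNat 2 PySem.Set.empty).all isPrimeA)]
  rw [zero_add]
  congr 1
  apply List.countP_congr
  intro num hnum
  have h1 : 1 ≤ num := ((PySem.List.mem_pyRange_one).mp hnum).1
  rw [indicatorA num.toNat (by omega)]

-- ===== B-side lemmas =====

theorem length_bumpB (ω : List Int) (m : Int) : (bumpB ω m).length = ω.length := by
  unfold bumpB
  cases h : PySem.List.pyGet? ω m with
  | none => rfl
  | some v => exact List.length_set ..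

theorem length_foldl_bumpB (L : List Int) (ω : List Int) :
    (L.foldl bumpB ω).length = ω.length := by
  induction L generalizing ω with
  | nil => rfl
  | cons x L ih => rw [List.foldl_cons, ih, length_bumpB]

theorem getD_bumpB (ω : List Int) (m : Int) (j : Nat) (hj : j < ω.length) (hm : 0 < m) :
    (bumpB ω m).getD j 0 = ω.getD j 0 + (if m = (j : Int) then 1 else 0) := by
  unfold bumpB
  by_cases hmj : m = (j : Int)
  · have hjt : m.toNat = j := by omega
    rw [PySem.List.pyGet?_of_nonneg ω (by omega), hjt, List.getElem?_eq_getElem hj,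
      if_pos hmj]
    rw [List.getD_eq_getElem _ _ (by rw [List.length_set]; exact hj),
      List.getElem_set_self, List.getD_eq_getElem _ _ hj]
  · rw [if_neg hmj]
    cases h : PySem.List.pyGet? ω m with
    | none => simp
    | some v =>
      rw [add_zero]
      have hmr : m.toNat < ω.length := by
        by_contra hge
        rw [PySem.List.pyGet?_of_nonneg ω (by omega), List.getElem?_eq_none (by omega)] at h
        simp at h
      have hne : m.toNat ≠ j := by omega
      rw [List.getD_eq_getElem _ _ (by rw [List.length_set]; exact hj),
        List.getElem_set_ne (by omega), List.getD_eq_getElem _ _ hj]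

theorem getD_foldl_bumpB (L : List Int) (hL : ∀ x ∈ L, 0 < x) (ω : List Int) (j : Nat)
    (hj : j < ω.length) :
    (L.foldl bumpB ω).getD j 0 = ω.getD j 0 + (L.count (j : Int) : Int) := by
  induction L generalizing ω with
  | nil => simp
  | cons x L ih =>
    rw [List.foldl_cons, ih (fun y hy => hL y (List.mem_cons_of_mem x hy)) _
      (by rw [length_bumpB]; exact hj)]
    rw [getD_bumpB ω x j hj (hL x List.mem_cons_self), List.count_cons]
    have : (x == (j : Int)) = decide (x = (j : Int)) := rfl
    by_cases hx : x = (j : Int) <;> simp [hx] <;> ring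

-- the body of Source B's outer sieve loop, named for the invariant proof
def stepB (b : Int) (ω : List Int) (p : Int) : List Int :=
  if PySem.List.pyGet? ω p == some 0 then (PySem.List.pyRange p b p).foldl bumpB ω else ω

theorem sieveB_eq (n : Int) :
    sieveB n = (PySem.List.pyRange 2 (n + 1) 1).foldl (stepB (n + 1))
      (List.replicate (n + 1).toNat 0) := rfl

theorem card_filter_step (j q : Nat) :
    (j.primeFactors.filter (fun p => p ≤ q + 1)).card
      = (j.primeFactors.filter (fun p => p ≤ q)).card
        + (if q + 1 ∈ j.primeFactors then 1 else 0) := by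
  have hsplit : j.primeFactors.filter (fun p => p ≤ q + 1)
      = j.primeFactors.filter (fun p => p ≤ q) ∪ j.primeFactors.filter (fun p => p = q + 1) := by
    rw [← Finset.filter_or]
    apply Finset.filter_congr
    intro p _
    constructor
    · intro h; omega
    · intro h; omega
  rw [hsplit, Finset.card_union_of_disjoint, Finset.filter_eq']
  · split_ifs with h <;> simp
  · rw [Finset.disjoint_left]
    intro p hp1 hp2
    simp only [Finset.mem_filter] at hp1 hp2
    omega

theorem count_pyRange_step (k : Nat) (hk : 2 ≤ k) (b : Int) (j : Nat) :
    ((PySem.List.pyRange (k : Int) b (k : Int)).count (j : Int) : Int)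
      = if k ∣ j ∧ k ≤ j ∧ (j : Int) < b then 1 else 0 := by
  have hkpos : (0 : Int) < (k : Int) := by omega
  have hnd : (PySem.List.pyRange (k : Int) b (k : Int)).Nodup := by
    rw [PySem.List.pyRange_of_pos _ _ hkpos]
    refine List.Nodup.map ?_ List.nodup_range
    intro a b hab
    simp only at hab
    have hk0 : (k : Int) ≠ 0 := by omega
    have h2 : (k : Int) * (a : Int) = (k : Int) * (b : Int) := by linarith
    have h3 := mul_left_cancel₀ hk0 h2
    exact_mod_cast h3
  have hmem : (j : Int) ∈ PySem.List.pyRange (k : Int) b (k : Int)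
      ↔ (k ∣ j ∧ k ≤ j ∧ (j : Int) < b) := by
    rw [PySem.List.mem_pyRange_iff_of_pos hkpos]
    constructor
    · rintro ⟨h1, h2, h3⟩
      have hdj : (k : Int) ∣ (j : Int) := by
        have h4 := dvd_add h3 (dvd_refl (k : Int))
        simpa using h4
      exact ⟨Int.natCast_dvd_natCast.mp hdj, by omega, h2⟩
    · rintro ⟨h1, h2, h3⟩
      exact ⟨by omega, h3, dvd_sub (Int.natCast_dvd_natCast.mpr h1) dvd_rfl⟩
  by_cases hj : k ∣ j ∧ k ≤ j ∧ (j : Int) < b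
  · rw [if_pos hj, List.count_eq_one_of_mem hnd (hmem.mpr hj)]; rfl
  · rw [if_neg hj, List.count_eq_zero_of_not_mem (fun hc => hj (hmem.mp hc))]; rfl

-- the q-th partial state of B's sieve: entry j holds the number of distinct
-- prime factors ≤ q of j
theorem sieve_inv (n : Int) (hn : 1 ≤ n) (q : Nat) (hq1 : 1 ≤ q) (hqn : (q : Int) ≤ n) :
    ((PySem.List.pyRange 2 ((q : Int) + 1) 1).foldl (stepB (n + 1))
        (List.replicate (n + 1).toNat 0)).length = (n + 1).toNat ∧
      ∀ j : Nat, j < (n + 1).toNat →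
        ((PySem.List.pyRange 2 ((q : Int) + 1) 1).foldl (stepB (n + 1))
            (List.replicate (n + 1).toNat 0)).getD j 0
          = ((j.primeFactors.filter (fun p => p ≤ q)).card : Int) := by
  induction q with
  | zero => omega
  | succ q ih =>
    rcases Nat.eq_zero_or_pos q with hq0 | hq0
    · -- q + 1 = 1 : the range 2..1 is empty; every entry is 0 and no prime is ≤ 1
      subst hq0
      rw [PySem.List.pyRange_one_eq_nil (by omega)]
      refine ⟨by simp, fun j hj => ?_⟩
      rw [List.foldl_nil, List.getD_eq_getElem _ _ (by simpa using hj),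
        List.getElem_replicate]
      have : j.primeFactors.filter (fun p => p ≤ 1) = ∅ := by
        rw [Finset.filter_eq_empty_iff]
        intro p hp
        have := (Nat.mem_primeFactors.mp hp).1.two_le
        omega
      rw [this]
      rfl
    · -- step q → q + 1, processing k = q + 1
      obtain ⟨ihlen, ihval⟩ := ih hq0 (by omega)
      set F := (PySem.List.pyRange 2 ((q : Int) + 1) 1).foldl (stepB (n + 1))
        (List.replicate (n + 1).toNat 0) with hF
      have hsplit : PySem.List.pyRange 2 (((q + 1 : Nat) : Int) + 1) 1
          = PySem.List.pyRange 2 ((q : Int) + 1) 1 ++ [(q : Int) + 1] := by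
        push_cast
        exact PySem.List.pyRange_one_succ_right (by omega)
      rw [hsplit, List.foldl_append, ← hF, List.foldl_cons, List.foldl_nil]
      have hqlt : q + 1 < (n + 1).toNat := by omega
      have hgate : PySem.List.pyGet? F ((q : Int) + 1)
          = some ((((q + 1).primeFactors.filter (fun p => p ≤ q)).card : Nat) : Int) := by
        have h1 : ((q : Int) + 1) = (((q + 1 : Nat) : Int)) := by push_cast; ring
        rw [h1, PySem.List.pyGet?_of_nonneg F (by omega)]
        have h2 : ((q + 1 : Nat) : Int).toNat = q + 1 := by omega
        rw [h2, List.getElem?_eq_getElem (by rw [ihlen]; exact hqlt)]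
        rw [← List.getD_eq_getElem F 0 (by rw [ihlen]; exact hqlt), ihval (q + 1) hqlt]
      by_cases hp : (q + 1).Prime
      · -- q+1 is prime: its sieve entry is still 0 and its multiples get bumped
        have hzero : ((q + 1).primeFactors.filter (fun p => p ≤ q)).card = 0 := by
          rw [hp.primeFactors]
          rw [Finset.card_eq_zero, Finset.filter_eq_empty_iff]
          intro p hp'
          rw [Finset.mem_singleton] at hp'
          omega
        unfold stepB
        have hgate0 : PySem.List.pyGet? F ((q : Int) + 1) = some 0 := by
          rw [hgate, hzero]; norm_num
        rw [hgate0, if_pos (by decide)]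
        constructor
        · rw [length_foldl_bumpB, ihlen]
        · intro j hj
          have hcast : ((q : Int) + 1) = (((q + 1 : Nat) : Int)) := by push_cast; ring
          rw [hcast]
          have hLpos : ∀ x ∈ PySem.List.pyRange (((q + 1 : Nat)) : Int) (n + 1)
              (((q + 1 : Nat)) : Int), 0 < x := by
            intro x hx
            have := (PySem.List.mem_pyRange_iff_of_pos
              (by omega : (0:Int) < ((q + 1 : Nat) : Int)) x).mp hx
            omega
          rw [getD_foldl_bumpB _ hLpos F j (by rw [ihlen]; exact hj), ihval j hj]
          rw [count_pyRange_step (q + 1) (by omega) (n + 1) j]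
          rw [card_filter_step j q]
          have hiff : q + 1 ∈ j.primeFactors ↔ ((q + 1) ∣ j ∧ q + 1 ≤ j ∧ (j : Int) < n + 1) := by
            rw [Nat.mem_primeFactors]
            constructor
            · rintro ⟨_, h1, h2⟩
              exact ⟨h1, Nat.le_of_dvd (by omega) h1, by omega⟩
            · rintro ⟨h1, h2, _⟩
              exact ⟨hp, h1, by omega⟩
          by_cases hc : (q + 1) ∣ j ∧ q + 1 ≤ j ∧ (j : Int) < n + 1
          · rw [if_pos hc, if_pos (hiff.mpr hc)]
            push_cast
            ring
          · rw [if_neg hc, if_neg (fun hm => hc (hiff.mp hm))]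
            push_cast
            ring
      · -- q+1 is composite (or 1): its entry is nonzero and nothing changes
        have hnz : ((q + 1).primeFactors.filter (fun p => p ≤ q)).card ≠ 0 := by
          have hmf : (q + 1).minFac ∈ (q + 1).primeFactors.filter (fun p => p ≤ q) := by
            rw [Finset.mem_filter, Nat.mem_primeFactors]
            have hpr : (q + 1).minFac.Prime := Nat.minFac_prime (by omega)
            have hle : (q + 1).minFac ≤ q + 1 := Nat.minFac_le (by omega)
            have hne : (q + 1).minFac ≠ q + 1 := by
              intro hc
              exact hp (Nat.prime_def_minFac.mpr ⟨by omega, hc⟩)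
            exact ⟨⟨hpr, Nat.minFac_dvd _, by omega⟩, by omega⟩
          intro hc
          rw [Finset.card_eq_zero] at hc
          rw [hc] at hmf
          exact absurd hmf (Finset.notMem_empty _)
        unfold stepB
        rw [hgate, if_neg (by
          simp only [beq_iff_eq, Option.some.injEq]
          exact_mod_cast hnz)]
        refine ⟨ihlen, fun j hj => ?_⟩
        rw [ihval j hj]
        have : j.primeFactors.filter (fun p => p ≤ q + 1)
            = j.primeFactors.filter (fun p => p ≤ q) := by
          apply Finset.filter_congr
          intro p hp'
          have hpprime := (Nat.mem_primeFactors.mp hp').1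
          have hpne : p ≠ q + 1 := fun hc => absurd (hc ▸ hpprime) hp
          constructor
          · intro h; omega
          · intro h; omega
        rw [this]

theorem countB (n : Int) (hn : 1 ≤ n) :
    count_almost_prime_alt n
      = ((List.range (n.toNat + 1)).countP (fun m => m.primeFactors.card == 2) : Nat) := by
  lift n to Nat using (by omega : (0:Int) ≤ n) with N
  have hN : 1 ≤ N := by exact_mod_cast hn
  unfold count_almost_prime_alt
  rw [PySem.List.foldl_beq_add_one, zero_add]
  simp only [Int.toNat_natCast]
  have htN : ((N : Int) + 1).toNat = N + 1 := by omega
  have hlist : sieveB (N : Int) = (List.range (N + 1)).map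
      (fun m => ((m.primeFactors.card : Nat) : Int)) := by
    obtain ⟨hlen, hval⟩ := sieve_inv (N : Int) hn N hN (le_refl _)
    rw [htN] at hlen hval
    rw [sieveB_eq, htN]
    apply List.ext_getElem
    · rw [hlen, List.length_map, List.length_range]
    · intro i h1 h2
      rw [List.getElem_map, List.getElem_range]
      have hi : i < N + 1 := by rw [← hlen]; exact h1
      rw [← List.getD_eq_getElem _ 0 h1, hval i hi]
      have hfull : i.primeFactors.filter (fun p => p ≤ N) = i.primeFactors :=
        Finset.filter_true_of_mem
          (fun p hp => by have := Nat.le_of_mem_primeFactors hp; omega)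
      rw [hfull]
  rw [hlist]
  rw [List.count, List.countP_map]
  congr 1
  apply List.countP_congr
  intro m _
  simp only [Function.comp_apply, beq_iff_eq]
  constructor
  · intro h; exact_mod_cast h
  · intro h; exact_mod_cast h

theorem A_trivial (n : Int) (h : n ≤ 0) : count_almost_prime n = 0 := by
  unfold count_almost_prime
  rw [PySem.List.pyRange_one_eq_nil (by omega)]
  rfl

theorem B_trivial (n : Int) (h : n ≤ 0) : count_almost_prime_alt n = 0 := by
  unfold count_almost_prime_alt sieveB
  rw [PySem.List.pyRange_one_eq_nil (by omega), List.foldl_nil,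
    PySem.List.foldl_beq_add_one, zero_add, List.count_replicate]
  norm_num

-- ===== VERDICT (by name: the statement is the Claim_ definition above) =====
theorem count_almost_prime_spec : Claim_equal_count_almost_prime := by
  intro n _
  unfold Spec_count_almost_prime
  by_cases h : n ≤ 0
  · rw [A_trivial n h, B_trivial n h]
  · rw [countA n, countB n (by omega)]
    congr 1
    rw [PySem.List.pyRange_one, List.countP_map]
    have h1 : ((n + 1 : Int) - 1).toNat = n.toNat := by omega
    rw [h1, List.range_succ_eq_map, List.countP_cons, List.countP_map]
    have h2 : ((0 : Nat).primeFactors.card == 2) = false := by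
      rw [Nat.primeFactors_zero]
      rfl
    rw [h2]
    simp only [Bool.false_eq_true, if_false, add_zero]
    apply List.countP_congr
    intro k _
    simp only [Function.comp_apply, beq_iff_eq]
    have h3 : ((1 : Int) + (k : Int)).toNat = k.succ := by omega
    rw [h3]
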